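-- pv_equiv track=rewrite | github.com/suhasgumma/Problem-Solving | kickStart/RoundD2020AlienPiano.py | pianoConversion
-- ===== SOURCE A (Python) =====
-- def pianoConversion(array, idx, prev):
--     if idx == len(array):
--         return 0
--
--     mini = float('inf')
--
--     if idx == 0:
--         for i in range(1, 5):
--             mini = min(mini, pianoConversion(array, idx+1, i))
--
--         return mini
--
--     el = array[idx]
--
--     if el > array[idx-1]:
--         for i in range(1, 5):
--             if i > prev:
--                 mini = min(mini, pianoConversion(array, idx+1, i))
--             else:
--                 mini = min(mini, 1+pianoConversion(array, idx+1, i))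
--
--     if el < array[idx-1]:
--         for i in range(1, 5):
--             if i < prev:
--                 mini = min(mini, pianoConversion(array, idx+1, i))
--             else:
--                 mini = min(mini, 1+pianoConversion(array, idx+1, i))
--
--     if el == array[idx-1]:
--         for i in range(1, 5):
--             if i == prev:
--                 mini = min(mini, pianoConversion(array, idx+1, i))
--             else:
--                 mini = min(mini, 1+pianoConversion(array, idx+1, i))
--
--     return mini
-- ===== SOURCE B (Python) =====
-- def _step(cur, pre, p, i):
--     if (cur > pre and i > p) or (cur < pre and i < p) or (cur == pre and i == p):
--         return 0
--     return 1
--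
--
-- def pianoConversion(array, idx, prev):
--     n = len(array)
--     if idx == n:
--         return 0
--     lo = 1 if idx == 0 else idx + 1
--     dp = [0, 0, 0, 0]
--     for j in range(n - 1, lo - 1, -1):
--         cur, pre = array[j], array[j - 1]
--         dp = [min(_step(cur, pre, p, i) + dp[i - 1] for i in range(1, 5))
--               for p in range(1, 5)]
--     if idx == 0:
--         return min(dp)
--     cur, pre = array[idx], array[idx - 1]
--     return min(_step(cur, pre, prev, i) + dp[i - 1] for i in range(1, 5))
-- ===== Notes on version B (the rewrite author's own statement) =====
-- stated objective: alternative
-- what changed: A's exponential 4-way branching recursion over (idx, prev) is replaced by a single backward bottom-up DP pass keeping a 4-entry table of optimal costs per previous-finger state (a timing run could not confirm a speed-up, so none is claimed).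
-- outside the precondition, e.g. on pianoConversion([3, -3, -1], -1, 3): A returns 0, B returns 1
import Mathlib
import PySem

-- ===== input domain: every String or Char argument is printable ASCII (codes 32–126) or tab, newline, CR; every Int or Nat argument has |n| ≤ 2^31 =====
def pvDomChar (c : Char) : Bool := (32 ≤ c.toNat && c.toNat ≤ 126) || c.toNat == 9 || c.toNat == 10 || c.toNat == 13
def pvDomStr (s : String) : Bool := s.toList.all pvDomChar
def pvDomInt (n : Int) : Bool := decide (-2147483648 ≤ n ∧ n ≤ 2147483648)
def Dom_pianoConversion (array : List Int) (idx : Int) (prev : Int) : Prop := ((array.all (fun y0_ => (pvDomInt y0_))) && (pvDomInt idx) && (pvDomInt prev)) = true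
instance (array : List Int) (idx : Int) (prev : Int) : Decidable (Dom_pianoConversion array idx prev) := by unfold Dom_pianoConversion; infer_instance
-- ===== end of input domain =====

-- B replaces A's exponential 4-way branching recursion by a backward bottom-up DP over the 4 finger states (objective: alternative).

-- ===== PORT A =====
-- Python's running 'mini = min(mini, x)' starting from float('inf'): none plays inf.
def pvMinO (m : Option Int) (x : Int) : Option Int :=
  some (match m with
        | none => x
        | some v => min v x)

-- Literal port of A's exponential recursion, guarded by fuel for totality only:
-- the fuel ((len - idx).toNat + 1) exceeds the recursion depth on every input
-- admitted by Pre_, so the 0-fuel branch is never taken there.  The pyGet? match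
-- returns 0 where Python raises IndexError (excluded by Pre_).
def pianoARec (array : List Int) (fuel : Nat) (idx : Int) (prev : Int) : Int :=
  match fuel with
  | 0 => 0
  | Nat.succ fuel =>
    if idx = (array.length : Int) then 0
    else if idx = 0 then
      let r1 := pianoARec array fuel (idx + 1) 1
      let r2 := pianoARec array fuel (idx + 1) 2
      let r3 := pianoARec array fuel (idx + 1) 3
      let r4 := pianoARec array fuel (idx + 1) 4
      (pvMinO (pvMinO (pvMinO (pvMinO none r1) r2) r3) r4).getD 0
    else
      match PySem.List.pyGet? array idx, PySem.List.pyGet? array (idx - 1) with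
      | some el, some p =>
        let r1 := pianoARec array fuel (idx + 1) 1
        let r2 := pianoARec array fuel (idx + 1) 2
        let r3 := pianoARec array fuel (idx + 1) 3
        let r4 := pianoARec array fuel (idx + 1) 4
        let m1 := if el > p then
            pvMinO (pvMinO (pvMinO (pvMinO none
              (if (1 : Int) > prev then r1 else 1 + r1))
              (if (2 : Int) > prev then r2 else 1 + r2))
              (if (3 : Int) > prev then r3 else 1 + r3))
              (if (4 : Int) > prev then r4 else 1 + r4)
          else none
        let m2 := if el < p then
            pvMinO (pvMinO (pvMinO (pvMinO m1
              (if (1 : Int) < prev then r1 else 1 + r1))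
              (if (2 : Int) < prev then r2 else 1 + r2))
              (if (3 : Int) < prev then r3 else 1 + r3))
              (if (4 : Int) < prev then r4 else 1 + r4)
          else m1
        let m3 := if el = p then
            pvMinO (pvMinO (pvMinO (pvMinO m2
              (if (1 : Int) = prev then r1 else 1 + r1))
              (if (2 : Int) = prev then r2 else 1 + r2))
              (if (3 : Int) = prev then r3 else 1 + r3))
              (if (4 : Int) = prev then r4 else 1 + r4)
          else m2
        m3.getD 0
      | _, _ => 0

def pianoConversion (array : List Int) (idx : Int) (prev : Int) : Int :=
  pianoARec array (((array.length : Int) - idx).toNat + 1) idx prev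

-- ===== PORT B =====
def pvStep (cur pre p i : Int) : Int :=
  if (cur > pre ∧ i > p) ∨ (cur < pre ∧ i < p) ∨ (cur = pre ∧ i = p) then 0 else 1

-- min(_step(cur,pre,p,i) + dp[i-1] for i in range(1,5))
def pvRowMin (cur pre p : Int) (dp : List Int) : Int :=
  ((PySem.List.min?
      ((PySem.List.pyRange 1 5 1).map
        (fun i => pvStep cur pre p i + PySem.List.pyGetD dp (i - 1) 0))
      (fun x => x)).getD 0)

-- Literal port of B's backward DP over the 4 finger states; pyGetD's default 0 is
-- never used inside Pre_ (all indices are in range there).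
def pianoConversion_alt (array : List Int) (idx : Int) (prev : Int) : Int :=
  let n : Int := (array.length : Int)
  if idx = n then 0
  else
    let lo : Int := if idx = 0 then 1 else idx + 1
    let dp := (PySem.List.pyRange (n - 1) (lo - 1) (-1)).foldl
      (fun dp j =>
        let cur := PySem.List.pyGetD array j 0
        let pre := PySem.List.pyGetD array (j - 1) 0
        (PySem.List.pyRange 1 5 1).map (fun p => pvRowMin cur pre p dp))
      [0, 0, 0, 0]
    if idx = 0 then (PySem.List.min? dp (fun x => x)).getD 0
    else
      let cur := PySem.List.pyGetD array idx 0
      let pre := PySem.List.pyGetD array (idx - 1) 0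
      pvRowMin cur pre prev dp

-- ===== PRECONDITION & SPEC =====
-- Pre_ excludes idx > len(array) (A raises IndexError there) and negative idx, on which
-- A's value comes from Python's accidental negative-index wraparound (outside the task's
-- natural domain 0 ≤ idx ≤ len).
def Pre_pianoConversion (array : List Int) (idx : Int) (prev : Int) : Prop :=
  0 ≤ idx ∧ idx ≤ (array.length : Int)
instance (array : List Int) (idx : Int) (prev : Int) : Decidable (Pre_pianoConversion array idx prev) := by unfold Pre_pianoConversion; infer_instance

def pvWitness_pianoConversion : List Int × Int × Int := ([1, 2, 2, 1], 0, 1)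

def Spec_pianoConversion (array : List Int) (idx : Int) (prev : Int) (out : Int) : Prop := out = pianoConversion_alt array idx prev
instance (array : List Int) (idx : Int) (prev : Int) (out : Int) : Decidable (Spec_pianoConversion array idx prev out) := by unfold Spec_pianoConversion; infer_instance

-- ===== CLAIM (what is proved, stated in full; the proofs are below) =====
def Claim_equal_pianoConversion : Prop := ∀ (array : List Int) (idx : Int) (prev : Int), Dom_pianoConversion array idx prev → Pre_pianoConversion array idx prev → Spec_pianoConversion array idx prev (pianoConversion array idx prev)

-- ===== LEMMAS AND PROOFS =====

-- Backward DP table: pvT array j = the vector of optimal costs f(j, p) for p = 1..4;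
-- [0,0,0,0] at and past the end.
def pvT (array : List Int) (j : Nat) : List Int :=
  if _h : j < array.length then
    (PySem.List.pyRange 1 5 1).map
      (fun p => pvRowMin (PySem.List.pyGetD array (j : Int) 0)
                         (PySem.List.pyGetD array ((j : Int) - 1) 0) p (pvT array (j + 1)))
  else [0, 0, 0, 0]
termination_by array.length - j

-- The value A computes at position j with previous finger p, expressed via the table.
def pvF (array : List Int) (j : Nat) (p : Int) : Int :=
  if j = array.length then 0
  else pvRowMin (PySem.List.pyGetD array (j : Int) 0)
                (PySem.List.pyGetD array ((j : Int) - 1) 0) p (pvT array (j + 1))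

theorem pvRange15 : PySem.List.pyRange 1 5 1 = [1, 2, 3, 4] := by decide

theorem pvT_eq (array : List Int) (j : Nat) (hj : j ≤ array.length) :
    pvT array j = [pvF array j 1, pvF array j 2, pvF array j 3, pvF array j 4] := by
  by_cases h : j = array.length
  · rw [pvT]; unfold pvF; simp [h]
  · have hlt : j < array.length := by omega
    rw [pvT]; unfold pvF; simp [hlt, h, pvRange15]

theorem pvMinO_chain (a b c d : Int) :
    (pvMinO (pvMinO (pvMinO (pvMinO none a) b) c) d).getD 0 = min (min (min a b) c) d := by
  simp [pvMinO]

theorem pvRowMin_eval (cur pre p : Int) (dp : List Int) :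
    pvRowMin cur pre p dp =
      min (min (min (pvStep cur pre p 1 + PySem.List.pyGetD dp 0 0)
                    (pvStep cur pre p 2 + PySem.List.pyGetD dp 1 0))
               (pvStep cur pre p 3 + PySem.List.pyGetD dp 2 0))
          (pvStep cur pre p 4 + PySem.List.pyGetD dp 3 0) := by
  unfold pvRowMin
  rw [pvRange15]
  simp [PySem.List.min?_id_cons, List.foldl]

theorem pvGetD_lit (a b c d : Int) :
    PySem.List.pyGetD [a, b, c, d] 0 0 = a ∧ PySem.List.pyGetD [a, b, c, d] 1 0 = b ∧
    PySem.List.pyGetD [a, b, c, d] 2 0 = c ∧ PySem.List.pyGetD [a, b, c, d] 3 0 = d := by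
  refine ⟨?_, ?_, ?_, ?_⟩ <;> simp [PySem.List.pyGetD, PySem.List.pyGet?, PySem.List.pyIdx?]

theorem pvStep_gt (el pr p i d : Int) (h : pr < el) :
    (if i > p then d else 1 + d) = pvStep el pr p i + d := by
  unfold pvStep; split_ifs <;> omega

theorem pvStep_lt (el pr p i d : Int) (h : el < pr) :
    (if i < p then d else 1 + d) = pvStep el pr p i + d := by
  unfold pvStep; split_ifs <;> omega

theorem pvStep_eq (el pr p i d : Int) (h : el = pr) :
    (if i = p then d else 1 + d) = pvStep el pr p i + d := by
  unfold pvStep; split_ifs <;> omega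

theorem pvRange_snoc (a b : Int) (h : b < a) :
    PySem.List.pyRange a b (-1) = PySem.List.pyRange a (b + 1) (-1) ++ [b + 1] := by
  rw [PySem.List.pyRange_neg_one, PySem.List.pyRange_neg_one]
  have h2 : (a - b).toNat = (a - (b + 1)).toNat + 1 := by omega
  rw [h2, List.range_succ, List.map_append]
  simp
  omega

-- The DP fold in B computes the table pvT.
theorem pvFold_eq (array : List Int) (lo : Nat) (h1 : 1 ≤ lo) (h2 : lo ≤ array.length) :
    (PySem.List.pyRange ((array.length : Int) - 1) ((lo : Int) - 1) (-1)).foldl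
      (fun dp j =>
        (PySem.List.pyRange 1 5 1).map
          (fun p => pvRowMin (PySem.List.pyGetD array j 0)
                             (PySem.List.pyGetD array (j - 1) 0) p dp))
      [0, 0, 0, 0] = pvT array lo := by
  suffices H : ∀ m lo, 1 ≤ lo → lo ≤ array.length → array.length - lo = m →
      (PySem.List.pyRange ((array.length : Int) - 1) ((lo : Int) - 1) (-1)).foldl
        (fun dp j =>
          (PySem.List.pyRange 1 5 1).map
            (fun p => pvRowMin (PySem.List.pyGetD array j 0)
                               (PySem.List.pyGetD array (j - 1) 0) p dp))
        [0, 0, 0, 0] = pvT array lo by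
    exact H _ lo h1 h2 rfl
  intro m
  induction m with
  | zero =>
    intro lo hl1 hl2 hm
    have hle : lo = array.length := by omega
    subst hle
    rw [PySem.List.pyRange_neg_one_eq_nil (by omega)]
    rw [pvT]
    simp
  | succ m ih =>
    intro lo hl1 hl2 hm
    have hlt : lo < array.length := by omega
    have hsn : PySem.List.pyRange ((array.length : Int) - 1) ((lo : Int) - 1) (-1) =
        PySem.List.pyRange ((array.length : Int) - 1) (((lo + 1 : Nat) : Int) - 1) (-1) ++ [(lo : Int)] := by
      have hx := pvRange_snoc ((array.length : Int) - 1) ((lo : Int) - 1) (by omega)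
      rw [hx]
      have e1 : ((lo : Int) - 1 + 1) = ((lo + 1 : Nat) : Int) - 1 := by push_cast; ring
      have e2 : ((lo : Int) - 1 + 1) = (lo : Int) := by ring
      rw [e1]
      rw [← e1, e2]
    rw [hsn, List.foldl_append, ih (lo + 1) (by omega) (by omega) (by omega)]
    simp only [List.foldl]
    conv_rhs => rw [pvT]
    rw [dif_pos hlt]

-- A's value at 1 ≤ j ≤ len, with enough fuel, equals the table-expressed value pvF.
theorem pvARec_eq_pvF (array : List Int) :
    ∀ (fuel : Nat) (j : Nat), array.length - j < fuel → 1 ≤ j → j ≤ array.length → ∀ p : Int,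
      pianoARec array fuel (j : Int) p = pvF array j p := by
  intro fuel
  induction fuel with
  | zero => intro j hf; omega
  | succ fuel ih =>
    intro j hf h1 h2 p
    by_cases hle : j = array.length
    · subst hle
      rw [pianoARec]
      unfold pvF
      simp
    · have hlt : j < array.length := by omega
      have hj0 : (j : Int) ≠ 0 := by omega
      have hjn : (j : Int) ≠ (array.length : Int) := by omega
      have hg1 : PySem.List.pyGet? array (j : Int) = some (array.getD j 0) := by
        simp [List.getElem?_eq_getElem hlt]
        try exact (List.getD_eq_getElem array 0 hlt).symm
      have hcast : ((j : Int) - 1) = ((j - 1 : Nat) : Int) := by omega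
      have hg2 : PySem.List.pyGet? array ((j : Int) - 1) = some (array.getD (j - 1) 0) := by
        rw [hcast]
        have hlt2 : j - 1 < array.length := by omega
        simp [List.getElem?_eq_getElem hlt2]
        try exact (List.getD_eq_getElem array 0 hlt2).symm
      have hstep : ((j : Int) + 1) = ((j + 1 : Nat) : Int) := by omega
      have hrec : ∀ q : Int, pianoARec array fuel ((j : Int) + 1) q = pvF array (j + 1) q := by
        intro q
        rw [hstep]
        exact ih (j + 1) (by omega) (by omega) (by omega) q
      rw [pianoARec]
      rw [if_neg hjn, if_neg hj0]
      split
      case _ el pr he1 he2 =>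
        rw [hg1] at he1; rw [hg2] at he2
        injection he1 with he1; injection he2 with he2
        subst he1; subst he2
        simp only [hrec]
        have hF : pvF array j p = pvRowMin (PySem.List.pyGetD array (j : Int) 0)
            (PySem.List.pyGetD array ((j : Int) - 1) 0) p (pvT array (j + 1)) := by
          unfold pvF
          rw [if_neg (by omega)]
        rw [hF, pvRowMin_eval, pvT_eq array (j + 1) (by omega)]
        obtain ⟨e0, e1, e2, e3⟩ := pvGetD_lit (pvF array (j + 1) 1) (pvF array (j + 1) 2)
          (pvF array (j + 1) 3) (pvF array (j + 1) 4)
        rw [e0, e1, e2, e3]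
        have hget : PySem.List.pyGetD array (j : Int) 0 = array.getD j 0 := by
          simp [PySem.List.pyGetD, hg1]
        have hget2 : PySem.List.pyGetD array ((j : Int) - 1) 0 = array.getD (j - 1) 0 := by
          simp [PySem.List.pyGetD, hg2]
        rw [hget, hget2]
        set el := array.getD j 0 with hel
        set pr := array.getD (j - 1) 0 with hpr
        set d1 := pvF array (j + 1) 1
        set d2 := pvF array (j + 1) 2
        set d3 := pvF array (j + 1) 3
        set d4 := pvF array (j + 1) 4
        rcases lt_trichotomy el pr with h | h | h
        · rw [if_neg (show ¬ el > pr by omega), if_pos (show el < pr from h),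
              if_neg (show ¬ el = pr by omega)]
          rw [pvStep_lt el pr p 1 d1 h, pvStep_lt el pr p 2 d2 h,
              pvStep_lt el pr p 3 d3 h, pvStep_lt el pr p 4 d4 h, pvMinO_chain]
        · rw [if_neg (show ¬ el > pr by omega), if_neg (show ¬ el < pr by omega),
              if_pos (show el = pr from h)]
          rw [pvStep_eq el pr p 1 d1 h, pvStep_eq el pr p 2 d2 h,
              pvStep_eq el pr p 3 d3 h, pvStep_eq el pr p 4 d4 h, pvMinO_chain]
        · rw [if_pos (show el > pr from h), if_neg (show ¬ el < pr by omega),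
              if_neg (show ¬ el = pr by omega)]
          rw [pvStep_gt el pr p 1 d1 h, pvStep_gt el pr p 2 d2 h,
              pvStep_gt el pr p 3 d3 h, pvStep_gt el pr p 4 d4 h, pvMinO_chain]
      case _ hne =>
        exact absurd (hne _ _ hg1 hg2) (by simp)

-- ===== VERDICT (by name: the statement is the Claim_ definition above) =====
theorem pianoConversion_spec : Claim_equal_pianoConversion := by
  intro array idx prev _ hpre
  obtain ⟨hp1, hp2⟩ := hpre
  unfold Spec_pianoConversion
  unfold pianoConversion
  by_cases hn : idx = (array.length : Int)
  · rw [pianoARec, pianoConversion_alt]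
    simp [hn]
  · have hlt : idx < (array.length : Int) := by omega
    obtain ⟨j, rfl⟩ : ∃ j : Nat, idx = (j : Int) := ⟨idx.toNat, by omega⟩
    have hjlt : j < array.length := by omega
    have hlen0 : (0 : Int) < (array.length : Int) := by omega
    by_cases hz : j = 0
    · subst hz
      simp only [Nat.cast_zero]
      -- A side: unfold one step of the fuelled recursion
      obtain ⟨f, hf, hfe⟩ : ∃ f, ((array.length : Int) - 0).toNat + 1 = f + 1 ∧
          f = ((array.length : Int) - 0).toNat := ⟨_, rfl, rfl⟩
      rw [hf, pianoARec, if_neg (by omega), if_pos rfl]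
      have h1i : ∀ q : Int, pianoARec array f (0 + 1) q = pvF array 1 q := by
        intro q
        have hc : ((0 : Int) + 1) = ((1 : Nat) : Int) := by norm_num
        rw [hc]
        exact pvARec_eq_pvF array f 1 (by omega) (by omega) (by omega) q
      rw [h1i, h1i, h1i, h1i, pvMinO_chain]
      -- B side
      simp only [pianoConversion_alt, if_neg (show ¬ (0 : Int) = (array.length : Int) by omega)]
      simp only [if_true]
      have hfold := pvFold_eq array 1 (by omega) (by omega)
      simp only [Nat.cast_one] at hfold
      rw [hfold, pvT_eq array 1 (by omega), PySem.List.min?_id_cons]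
      simp [List.foldl]
    · have hj1 : 1 ≤ j := by omega
      -- A side
      rw [pvARec_eq_pvF array _ j (by omega) hj1 (by omega) prev]
      have hF : pvF array j prev = pvRowMin (PySem.List.pyGetD array (j : Int) 0)
          (PySem.List.pyGetD array ((j : Int) - 1) 0) prev (pvT array (j + 1)) := by
        unfold pvF
        rw [if_neg (by omega)]
      rw [hF]
      -- B side
      simp only [pianoConversion_alt,
        if_neg (show ¬ ((j : Nat) : Int) = (array.length : Int) by omega),
        if_neg (show ¬ ((j : Nat) : Int) = 0 by omega)]
      have hc : ((j : Int) + 1 - 1) = (((j + 1 : Nat) : Int) - 1) := by push_cast; ring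
      rw [hc, pvFold_eq array (j + 1) (by omega) (by omega)]
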